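-- pv_equiv track=rewrite | github.com/LinOTP/LinOTP | linotp/lib/policy/evaluate.py | wildcard_icase_list_compare
-- ===== SOURCE A (Python) =====
-- WILDCARD_MATCH = "wildcard:match"
--
-- EXACT_MATCH = "exact:match"
--
-- NOT_MATCH = "not:match"
--
-- def wildcard_icase_list_compare(policy_conditions, value, ignore_case=True):
--     """
--     check if given string value matches the conditions
--
--     :param policy_condition: the condition described in the policy
--     :param value: the string value
--     :return: booleans
--     """
--
--     conditions = [x.strip() for x in policy_conditions.split(",")]
--
--     if "*" in conditions:
--         return WILDCARD_MATCH, True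
--
--     matched = False
--     match_type = NOT_MATCH
--
--     for condition in conditions:
--         if not condition:
--             continue
--
--         its_a_not_condition = False
--
--         if condition[0] in ["-", "!"]:
--             its_a_not_condition = True
--             condition = condition[1:]
--
--         #
--         # support for case sensitive comparison
--
--         if ignore_case:
--             cmp_value = value.lower()
--             cmp_condition = condition.lower()
--         else:
--             cmp_value = value
--             cmp_condition = condition
--
--         if cmp_value == cmp_condition:
--             if its_a_not_condition:
--                 return NOT_MATCH, False
--             else:
--                 matched = True
--                 match_type = EXACT_MATCH
--
--     return match_type, matched
-- ===== SOURCE B (Python) =====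
-- WILDCARD_MATCH = "wildcard:match"
--
-- EXACT_MATCH = "exact:match"
--
-- NOT_MATCH = "not:match"
--
-- def wildcard_icase_list_compare(policy_conditions, value, ignore_case=True):
--     """Group conditions into negatives and positives once, then decide by two
--     membership tests (a matching negative always wins; order is irrelevant)."""
--     conditions = [x.strip() for x in policy_conditions.split(",")]
--
--     if "*" in conditions:
--         return WILDCARD_MATCH, True
--
--     norm = (lambda s: s.lower()) if ignore_case else (lambda s: s)
--     cmp_value = norm(value)
--
--     negatives = [norm(c[1:]) for c in conditions if c and c[0] in "-!"]
--     positives = [norm(c) for c in conditions if c and c[0] not in "-!"]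
--
--     if cmp_value in negatives:
--         return NOT_MATCH, False
--     if cmp_value in positives:
--         return EXACT_MATCH, True
--     return NOT_MATCH, False
-- ===== Notes on version B (the rewrite author's own statement) =====
-- stated objective: alternative
-- what changed: Replaces the single early-returning scan carrying mutable matched/match_type state by an order-independent decision: conditions are partitioned once into normalised negative and positive lists, then the result is decided by two membership tests (negative wins, else positive, else default).
import Mathlib
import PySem

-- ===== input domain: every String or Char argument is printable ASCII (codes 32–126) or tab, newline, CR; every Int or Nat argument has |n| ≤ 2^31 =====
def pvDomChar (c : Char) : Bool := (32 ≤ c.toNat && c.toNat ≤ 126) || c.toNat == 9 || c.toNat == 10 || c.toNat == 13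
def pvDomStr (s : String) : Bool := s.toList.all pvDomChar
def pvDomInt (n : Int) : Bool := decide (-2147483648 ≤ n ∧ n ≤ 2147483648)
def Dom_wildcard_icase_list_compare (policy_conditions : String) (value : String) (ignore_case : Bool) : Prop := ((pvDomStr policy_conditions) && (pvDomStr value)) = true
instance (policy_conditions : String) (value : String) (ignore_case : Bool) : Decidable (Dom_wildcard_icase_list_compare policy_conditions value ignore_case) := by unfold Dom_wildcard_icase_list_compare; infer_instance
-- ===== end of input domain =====

-- B partitions the stripped conditions into normalised negative/positive lists and decides
-- by two membership tests instead of A's single early-returning stateful scan (objective: alternative).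


-- ===== PORT A =====
-- A's for-loop with its early returns, carrying the (match_type, matched) state;
-- the case comparison is written in each branch (its_a_not_condition true/false) of the branch
-- on condition[0] ∈ ["-", "!"], the only place the Python's control flow splits.
def wicLoopA (value : String) (ignore_case : Bool) : List String → String × Bool → String × Bool
  | [], st => st
  | condition :: rest, st =>
    if condition = "" then wicLoopA value ignore_case rest st
    else
      if PySem.Str.pyGet? condition 0 == some '-' || PySem.Str.pyGet? condition 0 == some '!' then
        -- its_a_not_condition = True; condition = condition[1:]
        if (if ignore_case then PySem.Str.lower value else value) =
           (if ignore_case then PySem.Str.lower (PySem.Str.slice condition (some 1) none)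
            else PySem.Str.slice condition (some 1) none) then
          ("not:match", false)
        else wicLoopA value ignore_case rest st
      else
        if (if ignore_case then PySem.Str.lower value else value) =
           (if ignore_case then PySem.Str.lower condition else condition) then
          wicLoopA value ignore_case rest ("exact:match", true)
        else wicLoopA value ignore_case rest st

def wildcard_icase_list_compare (policy_conditions : String) (value : String) (ignore_case : Bool) : String × Bool :=
  -- sep "," ≠ "", so split? always returns some
  let conditions := ((PySem.Str.split? policy_conditions ",").getD []).map PySem.Str.strip
  if conditions.contains "*" then ("wildcard:match", true)
  else wicLoopA value ignore_case conditions ("not:match", false)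

-- ===== PORT B =====
def wicNorm (ignore_case : Bool) (s : String) : String := if ignore_case then PySem.Str.lower s else s

-- "c and c[0] in '-!'"
def wicIsNeg (c : String) : Bool :=
  c != "" && (PySem.Str.pyGet? c 0 == some '-' || PySem.Str.pyGet? c 0 == some '!')

def wildcard_icase_list_compare_alt (policy_conditions : String) (value : String) (ignore_case : Bool) : String × Bool :=
  -- sep "," ≠ "", so split? always returns some
  let conditions := ((PySem.Str.split? policy_conditions ",").getD []).map PySem.Str.strip
  if conditions.contains "*" then ("wildcard:match", true)
  else
    let cmp_value := wicNorm ignore_case value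
    let negatives := (conditions.filter wicIsNeg).map
      (fun c => wicNorm ignore_case (PySem.Str.slice c (some 1) none))
    let positives := (conditions.filter (fun c => c != "" && !wicIsNeg c)).map (wicNorm ignore_case)
    if negatives.contains cmp_value then ("not:match", false)
    else if positives.contains cmp_value then ("exact:match", true)
    else ("not:match", false)

-- ===== PRECONDITION & SPEC =====
def Spec_wildcard_icase_list_compare (policy_conditions : String) (value : String) (ignore_case : Bool) (out : String × Bool) : Prop := out = wildcard_icase_list_compare_alt policy_conditions value ignore_case
instance (policy_conditions : String) (value : String) (ignore_case : Bool) (out : String × Bool) : Decidable (Spec_wildcard_icase_list_compare policy_conditions value ignore_case out) := by unfold Spec_wildcard_icase_list_compare; infer_instance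

-- ===== CLAIM (what is proved, stated in full; the proofs are below) =====
def Claim_equal_wildcard_icase_list_compare : Prop := ∀ (policy_conditions : String) (value : String) (ignore_case : Bool), Dom_wildcard_icase_list_compare policy_conditions value ignore_case → Spec_wildcard_icase_list_compare policy_conditions value ignore_case (wildcard_icase_list_compare policy_conditions value ignore_case)

-- ===== LEMMAS AND PROOFS =====

theorem wicIsNeg_empty : wicIsNeg "" = false := rfl

-- the loop invariant: A's scan over cs from a state that is (not:match,false) or (exact:match,true)
-- equals B's partition-and-test over cs, with st as the default
theorem wicLoopA_eq (value : String) (ic : Bool) (cs : List String) (st : String × Bool)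
    (hst : st = ("not:match", false) ∨ st = ("exact:match", true)) :
    wicLoopA value ic cs st =
      (if ((cs.filter wicIsNeg).map
            (fun c => wicNorm ic (PySem.Str.slice c (some 1) none))).contains (wicNorm ic value)
       then ("not:match", false)
       else if ((cs.filter (fun c => c != "" && !wicIsNeg c)).map (wicNorm ic)).contains (wicNorm ic value)
       then ("exact:match", true)
       else st) := by
  induction cs generalizing st with
  | nil => simp [wicLoopA]
  | cons c rest ih =>
    by_cases hc : c = ""
    · subst hc
      rw [wicLoopA, if_pos rfl, ih st hst]
      have h1 : List.filter wicIsNeg ("" :: rest) = List.filter wicIsNeg rest := by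
        rw [List.filter_cons]; simp [wicIsNeg_empty]
      have h2 : List.filter (fun c => c != "" && !wicIsNeg c) ("" :: rest) =
          List.filter (fun c => c != "" && !wicIsNeg c) rest := by
        rw [List.filter_cons]; simp
      rw [h1, h2]
    · have hne : (c != "") = true := by simp [hc]
      rw [wicLoopA, if_neg hc]
      by_cases hn : (PySem.Str.pyGet? c 0 == some '-' || PySem.Str.pyGet? c 0 == some '!') = true
      · -- negative condition
        have hneg : wicIsNeg c = true := by
          simp only [wicIsNeg, hne, hn, Bool.and_self]
        rw [if_pos hn]
        simp only [List.filter_cons, hneg, Bool.not_true, Bool.and_false, Bool.false_eq_true,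
          if_false, eq_self_iff_true, if_true, List.map_cons, List.contains_cons]
        by_cases hm : wicNorm ic value = wicNorm ic (PySem.Str.slice c (some 1) none)
        · have hm' : (if ic then PySem.Str.lower value else value) =
              (if ic then PySem.Str.lower (PySem.Str.slice c (some 1) none)
               else PySem.Str.slice c (some 1) none) := by
            unfold wicNorm at hm; exact hm
          rw [if_pos hm']
          simp [hm]
        · have hm' : ¬ ((if ic then PySem.Str.lower value else value) =
              (if ic then PySem.Str.lower (PySem.Str.slice c (some 1) none)
               else PySem.Str.slice c (some 1) none)) := by
            unfold wicNorm at hm; exact hm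
          rw [if_neg hm', ih st hst]
          have hbe : (wicNorm ic value == wicNorm ic (PySem.Str.slice c (some 1) none)) = false := by
            simp only [beq_eq_false_iff_ne, ne_eq]
            exact hm
          rw [hbe]
          simp only [Bool.false_or]
      · -- positive condition
        have hn' : (PySem.Str.pyGet? c 0 == some '-' || PySem.Str.pyGet? c 0 == some '!') = false := by
          simpa using hn
        have hneg : wicIsNeg c = false := by
          simp only [wicIsNeg, hn', Bool.and_false]
        rw [if_neg hn]
        simp only [List.filter_cons, hneg, hne, Bool.not_false, Bool.and_self, Bool.true_and,
          Bool.false_eq_true, if_false, eq_self_iff_true, if_true, List.map_cons, List.contains_cons]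
        by_cases hm : wicNorm ic value = wicNorm ic c
        · have hm' : (if ic then PySem.Str.lower value else value) =
              (if ic then PySem.Str.lower c else c) := by
            unfold wicNorm at hm; exact hm
          rw [if_pos hm', ih ("exact:match", true) (Or.inr rfl)]
          have hbe : (wicNorm ic value == wicNorm ic c) = true := by simp [hm]
          simp only [hbe, Bool.true_or]
          split_ifs <;> rfl
        · have hm' : ¬ ((if ic then PySem.Str.lower value else value) =
              (if ic then PySem.Str.lower c else c)) := by
            unfold wicNorm at hm; exact hm
          rw [if_neg hm', ih st hst]
          have hbe : (wicNorm ic value == wicNorm ic c) = false := by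
            simp only [beq_eq_false_iff_ne, ne_eq]
            exact hm
          rw [hbe]
          simp only [Bool.false_or]

-- ===== VERDICT (by name: the statement is the Claim_ definition above) =====
theorem wildcard_icase_list_compare_spec : Claim_equal_wildcard_icase_list_compare := by
  intro pc value ic _
  unfold Spec_wildcard_icase_list_compare
  simp only [wildcard_icase_list_compare, wildcard_icase_list_compare_alt]
  by_cases hw : (((PySem.Str.split? pc ",").getD []).map PySem.Str.strip).contains "*" = true
  · rw [if_pos hw, if_pos hw]
  · rw [if_neg hw, if_neg hw]
    exact wicLoopA_eq value ic _ _ (Or.inl rfl)
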